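-- pv_equiv track=rewrite | github.com/ashish1446/Python-for-Data-science--1- | w5ppa5.py | first_three
-- ===== SOURCE A (Python) =====
-- def first_three(l):
--     sorted = []
--     sorted.append(l[0])
--     for i in range(1,len(l)):
--         flag = True
--         for j in range(len(sorted)):
--
--             if l[i]>sorted[j]:
--
--                 beforej = sorted[:j]
--                 afterj = sorted[j: ]
--                 insert = [l[i]]
--
--                 sorted = beforej+insert+afterj
--                 flag = False
--                 break
--
--
--         if flag:
--             sorted.append(l[i])
--
--     return sorted[0], sorted[1], sorted[2]
-- ===== SOURCE B (Python) =====
-- def first_three(l):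
--     s = sorted(l, reverse=True)
--     return s[0], s[1], s[2]
-- ===== Notes on version B (the rewrite author's own statement) =====
-- stated objective: idiomatic
-- what changed: Replaces A's hand-written quadratic insertion sort (scan for insertion point, rebuild by slicing) with one call to Python's built-in stable reverse sort followed by taking the first three elements.
import Mathlib
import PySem

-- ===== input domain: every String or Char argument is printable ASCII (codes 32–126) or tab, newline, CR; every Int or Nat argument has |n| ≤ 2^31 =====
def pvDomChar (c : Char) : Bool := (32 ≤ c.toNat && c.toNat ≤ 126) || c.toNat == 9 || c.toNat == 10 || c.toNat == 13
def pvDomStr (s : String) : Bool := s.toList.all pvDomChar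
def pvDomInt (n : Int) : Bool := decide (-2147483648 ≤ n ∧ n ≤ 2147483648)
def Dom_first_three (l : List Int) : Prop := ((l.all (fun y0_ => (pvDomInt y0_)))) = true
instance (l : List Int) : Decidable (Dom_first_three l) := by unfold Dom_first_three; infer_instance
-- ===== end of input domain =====

-- B replaces A's hand-written quadratic insertion sort with the built-in stable reverse sort (idiomatic).

-- ===== PORT A =====
-- inner loop of A: scan `sorted` for the first j with x > sorted[j] and insert x there
-- (A builds the same list via sorted[:j] + [x] + sorted[j:]); if no such j (flag), append x.
def ftInsert (x : Int) (s : List Int) : List Int :=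
  match s with
  | [] => [x]                          -- flag stayed True: sorted.append(l[i])
  | y :: ys => if x > y then x :: y :: ys else y :: ftInsert x ys

def first_three (l : List Int) : List Int :=
  match l with
  | [] => []                            -- Python: l[0] raises IndexError (excluded by Pre_)
  | x :: rest =>
    let s := rest.foldl (fun acc v => ftInsert v acc) [x]
    [PySem.List.pyGetD s 0 0, PySem.List.pyGetD s 1 0, PySem.List.pyGetD s 2 0]

-- ===== PORT B =====
def first_three_alt (l : List Int) : List Int :=
  let s := PySem.List.sorted l (fun x => x) true
  [PySem.List.pyGetD s 0 0, PySem.List.pyGetD s 1 0, PySem.List.pyGetD s 2 0]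

-- ===== PRECONDITION & SPEC =====
-- Python A raises IndexError on lists of fewer than 3 elements (l[0] / sorted[1] / sorted[2]); B raises there too.
def Pre_first_three (l : List Int) : Prop := 3 ≤ l.length
instance (l : List Int) : Decidable (Pre_first_three l) := by unfold Pre_first_three; infer_instance
def pvWitness_first_three : List Int := [5, 1, 4]

def Spec_first_three (l : List Int) (out : List Int) : Prop := out = first_three_alt l
instance (l : List Int) (out : List Int) : Decidable (Spec_first_three l out) := by unfold Spec_first_three; infer_instance

-- ===== CLAIM (what is proved, stated in full; the proofs are below) =====
def Claim_equal_first_three : Prop := ∀ (l : List Int), Dom_first_three l → Pre_first_three l → Spec_first_three l (first_three l)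

-- ===== LEMMAS AND PROOFS =====
theorem ftInsert_eq_insertBy (x : Int) (s : List Int) :
    ftInsert x s = PySem.List.insertBy (fun a b => decide (b < a)) x s := by
  induction s with
  | nil => rfl
  | cons y ys ih =>
    simp only [ftInsert, PySem.List.insertBy, ih, gt_iff_lt, decide_eq_true_eq]

theorem funext_ftInsert : (fun (acc : List Int) v => ftInsert v acc) =
    fun acc v => PySem.List.insertBy (fun a b => decide (b < a)) v acc := by
  funext acc v; exact ftInsert_eq_insertBy v acc

theorem foldl_ftInsert_eq_sorted (l : List Int) :
    (match l with
     | [] => ([] : List Int)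
     | x :: rest => rest.foldl (fun acc v => ftInsert v acc) [x]) =
    PySem.List.sorted l (fun x => x) true := by
  rw [PySem.List.sorted_rev_eq_foldl_insertBy]
  cases l with
  | nil => rfl
  | cons x rest =>
    simp only [List.foldl_cons, funext_ftInsert]
    rfl

-- ===== VERDICT (by name: the statement is the Claim_ definition above) =====
theorem first_three_spec : Claim_equal_first_three := by
  intro l _ hpre
  unfold Spec_first_three first_three first_three_alt
  cases l with
  | nil => simp [Pre_first_three] at hpre
  | cons x rest =>
    have h := foldl_ftInsert_eq_sorted (x :: rest)
    simp only at h
    simp only [h]
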